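-- pv_equiv track=rewrite | github.com/FedericaBrando/programming_federica_brando | exam/final_exam_federica_brando.py | start_index
-- ===== SOURCE A (Python) =====
-- def start_index(F):
--     """Function that takes in input the score matrix, finds the highest scores throughout the whole matrix and
--     stores into a list of tuples the indexes of the scores"""
--     c = len(F[0])
--     r = len(F)
--     max_score = F[0][0]
--     max_out = []
--     for col in range(1, c):
--         for row in range(1, r):
--             temp_score = F[row][col]
--             if temp_score > max_score:
--                 max_score = temp_score
--                 max_out = [[row, col]]
--             elif temp_score == max_score:
--                 temp_coord = [row, col]
--                 max_out.append(temp_coord)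
--     return max_out
-- ===== SOURCE B (Python) =====
-- def start_index(F):
--     c = len(F[0])
--     r = len(F)
--     max_score = F[0][0]
--     for row in range(1, r):
--         for col in range(1, c):
--             if F[row][col] > max_score:
--                 max_score = F[row][col]
--     return [[row, col] for col in range(1, c) for row in range(1, r)
--             if F[row][col] == max_score]
-- ===== Notes on version B (the rewrite author's own statement) =====
-- stated objective: simpler
-- what changed: A's single fused scan keeping a running max with reset-and-collect of tied coordinates is replaced by two separate passes: a max-only loop and a comprehension that collects all coordinates equal to that max in column-major order.
import Mathlib
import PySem

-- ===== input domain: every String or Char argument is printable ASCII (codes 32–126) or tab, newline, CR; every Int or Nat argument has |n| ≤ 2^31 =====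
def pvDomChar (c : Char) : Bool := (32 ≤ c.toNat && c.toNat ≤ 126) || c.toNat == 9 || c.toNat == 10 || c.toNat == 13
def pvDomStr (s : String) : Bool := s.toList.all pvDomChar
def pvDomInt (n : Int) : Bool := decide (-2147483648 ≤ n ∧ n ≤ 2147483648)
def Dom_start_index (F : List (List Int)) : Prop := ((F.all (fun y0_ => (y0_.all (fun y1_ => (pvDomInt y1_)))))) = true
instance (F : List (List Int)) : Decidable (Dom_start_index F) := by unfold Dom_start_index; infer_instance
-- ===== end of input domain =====

-- B replaces A's fused single scan (running max with reset-and-collect) by two passes: a max-only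
-- pass and a comprehension collecting the tied coordinates; objective: simpler, same O(r*c) cost.

-- ===== PORT A =====
def start_index (F : List (List Int)) : List (List Int) :=
  let c : Int := ((PySem.List.pyGetD F 0 []).length : Int)
  let r : Int := (F.length : Int)
  let maxScore : Int := PySem.List.pyGetD (PySem.List.pyGetD F 0 []) 0 0
  (((PySem.List.pyRange 1 c 1).foldl (fun s col =>
      (PySem.List.pyRange 1 r 1).foldl (fun s row =>
        let temp := PySem.List.pyGetD (PySem.List.pyGetD F row []) col 0
        if temp > s.1 then (temp, [[row, col]])
        else if temp = s.1 then (s.1, s.2 ++ [[row, col]])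
        else s) s)
    ((maxScore, ([] : List (List Int))) : Int × List (List Int)))).2

-- ===== PORT B =====
def start_index_alt (F : List (List Int)) : List (List Int) :=
  let c : Int := ((PySem.List.pyGetD F 0 []).length : Int)
  let r : Int := (F.length : Int)
  let maxScore : Int :=
    (PySem.List.pyRange 1 r 1).foldl (fun m row =>
      (PySem.List.pyRange 1 c 1).foldl (fun m col =>
        if PySem.List.pyGetD (PySem.List.pyGetD F row []) col 0 > m
        then PySem.List.pyGetD (PySem.List.pyGetD F row []) col 0 else m) m)
      (PySem.List.pyGetD (PySem.List.pyGetD F 0 []) 0 0)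
  (PySem.List.pyRange 1 c 1).flatMap (fun col =>
    (PySem.List.pyRange 1 r 1).filterMap (fun row =>
      if PySem.List.pyGetD (PySem.List.pyGetD F row []) col 0 = maxScore
      then some [row, col] else none))

-- ===== PRECONDITION & SPEC =====
-- Pre_ excludes exactly the inputs where Python A raises IndexError: an empty matrix, an empty
-- first row, or (when the first row has ≥ 2 columns) a row shorter than the first row.
def Pre_start_index (F : List (List Int)) : Prop :=
  F ≠ [] ∧ F.headI ≠ [] ∧ (1 < F.headI.length → ∀ row ∈ F, F.headI.length ≤ row.length)
instance (F : List (List Int)) : Decidable (Pre_start_index F) := by unfold Pre_start_index; infer_instance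
def pvWitness_start_index : List (List Int) := [[1, 2], [3, 4]]
def Spec_start_index (F : List (List Int)) (out : List (List Int)) : Prop := out = start_index_alt F
instance (F : List (List Int)) (out : List (List Int)) : Decidable (Spec_start_index F out) := by unfold Spec_start_index; infer_instance

-- ===== CLAIM (what is proved, stated in full; the proofs are below) =====
def Claim_equal_start_index : Prop := ∀ (F : List (List Int)), Dom_start_index F → Pre_start_index F → Spec_start_index F (start_index F)

-- ===== LEMMAS AND PROOFS =====

-- A's loop body, abstracted over the scanned (score, coordinate) pairs.
def pvStep {β : Type} (s : Int × List β) (p : Int × β) : Int × List β :=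
  if p.1 > s.1 then (p.1, [p.2])
  else if p.1 = s.1 then (s.1, s.2 ++ [p.2])
  else s

-- Characterisation of A's fused scan: the first component is the running max, the second is the
-- original accumulator (kept iff the max never grew) followed by all pairs tied with the final max.
theorem pvFused {β : Type} (P : List (Int × β)) (m : Int) (acc : List β) :
    P.foldl pvStep (m, acc) =
      (P.foldl (fun a p => max a p.1) m,
       (if P.foldl (fun a p => max a p.1) m = m then acc else []) ++
         (P.filter (fun p => decide (p.1 = P.foldl (fun a p => max a p.1) m))).map Prod.snd) := by
  induction P generalizing m acc with
  | nil => simp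
  | cons p P ih =>
    obtain ⟨t, b⟩ := p
    rw [List.foldl_cons, List.foldl_cons]
    rcases lt_trichotomy m t with h1 | h1 | h1
    · have hstep : pvStep (m, acc) (t, b) = (t, [b]) := by
        simp [pvStep, h1]
      rw [hstep, ih, max_eq_right h1.le]
      set M := P.foldl (fun a p => max a p.1) t with hMdef
      have hM : t ≤ M := by
        have := (PySem.List.le_foldl_max_int P Prod.fst t).1
        simpa [hMdef] using this
      have hne : M ≠ m := by omega
      rw [if_neg hne, List.nil_append, List.filter_cons]
      by_cases ht : t = M
      · rw [if_pos ht.symm]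
        simp [ht]
      · rw [if_neg (fun h => ht h.symm)]
        simp [ht]
    · subst h1
      have hstep : pvStep (m, acc) (m, b) = (m, acc ++ [b]) := by
        simp [pvStep]
      rw [hstep, ih]
      rw [show max m m = m from max_self m]
      set M := P.foldl (fun a p => max a p.1) m with hMdef
      rw [List.filter_cons]
      by_cases hm : M = m
      · rw [if_pos hm, if_pos hm]
        simp [hm, List.append_assoc]
      · rw [if_neg hm, if_neg hm]
        have : ¬ ((m, b).1 = M) := fun h => hm h.symm
        simp [this]
    · have hstep : pvStep (m, acc) (t, b) = (m, acc) := by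
        simp only [pvStep]
        rw [if_neg (by omega), if_neg (by omega)]
      rw [hstep, ih, max_eq_left h1.le]
      set M := P.foldl (fun a p => max a p.1) m with hMdef
      have hM : m ≤ M := by
        have := (PySem.List.le_foldl_max_int P Prod.fst m).1
        simpa [hMdef] using this
      have hd : decide ((t, b).1 = M) = false := decide_eq_false (by simp; omega)
      rw [List.filter_cons, hd]
      simp

-- a foldl max is determined by the set of scanned elements
theorem pvFoldlMax_congr (L1 L2 : List Int) (m : Int) (h : ∀ x, x ∈ L1 ↔ x ∈ L2) :
    L1.foldl max m = L2.foldl max m := by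
  apply le_antisymm
  · rcases PySem.List.foldl_max_mem L1 m with he | he
    · rw [he]; exact (PySem.List.le_foldl_max L2 m).1
    · exact (PySem.List.le_foldl_max L2 m).2 _ ((h _).mp he)
  · rcases PySem.List.foldl_max_mem L2 m with he | he
    · rw [he]; exact (PySem.List.le_foldl_max L1 m).1
    · exact (PySem.List.le_foldl_max L1 m).2 _ ((h _).mpr he)

theorem pvFilterMap_if {α β : Type} (l : List α) (p : α → Prop) [DecidablePred p] (g : α → β) :
    l.filterMap (fun x => if p x then some (g x) else none) =
      (l.filter (fun x => decide (p x))).map g := by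
  induction l with
  | nil => rfl
  | cons x l ih =>
    by_cases hx : p x <;> simp [hx, ih]

theorem start_index_eq_alt (F : List (List Int)) : start_index F = start_index_alt F := by
  unfold start_index start_index_alt
  simp only []
  set c : Int := ((PySem.List.pyGetD F 0 []).length : Int) with hc
  set r : Int := (F.length : Int) with hr
  set v : Int → Int → Int := fun row col => PySem.List.pyGetD (PySem.List.pyGetD F row []) col 0 with hv
  set m0 : Int := PySem.List.pyGetD (PySem.List.pyGetD F 0 []) 0 0 with hm0
  set C := PySem.List.pyRange 1 c 1 with hC
  set R := PySem.List.pyRange 1 r 1 with hR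
  -- A's nested fold is a single fold of pvStep over the column-major (score, coord) pairs
  have hA :
      (C.foldl (fun s col =>
        R.foldl (fun s row =>
          if v row col > s.1 then (v row col, [[row, col]])
          else if v row col = s.1 then (s.1, s.2 ++ [[row, col]])
          else s) s) ((m0, ([] : List (List Int))))) =
      (C.flatMap (fun col => R.map (fun row => (v row col, ([row, col] : List Int))))).foldl pvStep
        ((m0, ([] : List (List Int)))) := by
    rw [List.foldl_flatMap]
    apply PySem.List.foldl_congr_mem
    intro s col _
    rw [List.foldl_map]
    rfl
  -- B's nested max loop is a fold of max over the row-major scores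
  have hB :
      (R.foldl (fun m row => C.foldl (fun m col => if v row col > m then v row col else m) m) m0) =
      (R.flatMap (fun row => C.map (fun col => v row col))).foldl max m0 := by
    rw [List.foldl_flatMap]
    apply PySem.List.foldl_congr_mem
    intro m row _
    rw [List.foldl_map]
    apply PySem.List.foldl_congr_mem
    intro a col _
    rcases le_or_gt (v row col) a with h | h
    · rw [max_eq_left h, if_neg (by omega)]
    · rw [max_eq_right h.le, if_pos (by omega)]
  -- the two maxima agree: same scanned scores, modulo traversal order
  have hmax :
      (R.flatMap (fun row => C.map (fun col => v row col))).foldl max m0 =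
      (C.flatMap (fun col => R.map (fun row => v row col))).foldl max m0 := by
    apply pvFoldlMax_congr
    intro x
    simp only [List.mem_flatMap, List.mem_map]
    constructor
    · rintro ⟨row, hrow, col, hcol, hx⟩; exact ⟨col, hcol, row, hrow, hx⟩
    · rintro ⟨col, hcol, row, hrow, hx⟩; exact ⟨row, hrow, col, hcol, hx⟩
  rw [hA, hB, hmax, pvFused]
  have hMM :
      (C.flatMap (fun col => R.map (fun row => (v row col, ([row, col] : List Int))))).foldl
        (fun a p => max a p.1) m0 =
      (C.flatMap (fun col => R.map (fun row => v row col))).foldl max m0 := by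
    rw [List.foldl_flatMap, List.foldl_flatMap]
    apply PySem.List.foldl_congr_mem
    intro a col _
    rw [List.foldl_map, List.foldl_map]
  rw [hMM]
  set M := (C.flatMap (fun col => R.map (fun row => v row col))).foldl max m0 with hMdef
  rw [ite_self, List.nil_append, List.filter_flatMap, List.map_flatMap]
  have hcol : ∀ col : Int,
      ((R.map (fun row => (v row col, ([row, col] : List Int)))).filter
          (fun p => decide (p.1 = M))).map Prod.snd =
      R.filterMap (fun row => if v row col = M then some [row, col] else none) := by
    intro col
    rw [pvFilterMap_if, List.filter_map, List.map_map]
    rfl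
  simp only [hcol]
  rfl

-- ===== VERDICT (by name: the statement is the Claim_ definition above) =====
theorem start_index_spec : Claim_equal_start_index := by
  intro F _ _
  unfold Spec_start_index
  exact start_index_eq_alt F
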